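-- pv_equiv track=rewrite | github.com/Murkyshadow/tetge | main.py | rotate_block
-- ===== SOURCE A (Python) =====
-- def rotate_block(block, rt):
--     rotated = block
--     for r in range(rt + 1):
--         rotated = list(zip(*rotated))[::-1]
--     rotated = [list(i) for i in rotated]
--     for y, yb in enumerate(rotated):
--         for x, b in enumerate(yb):
--             if b == 1 and x < len(yb) - 1:
--                 for i in range(x, len(yb) - 1):
--                     if rotated[y][i + 1] == 1:
--                         break
--                 else:
--                     for i in range(x, len(yb) - 1):
--                         rotated[y].pop(x + 1)
--     return rotated
-- ===== SOURCE B (Python) =====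
-- def rotate_block(block, rt):
--     rotated = block
--     n = rt + 1
--     while n > 0:
--         rotated = list(zip(*rotated))[::-1]
--         n -= 1
--     out = []
--     for row in rotated:
--         row = list(row)
--         j = len(row)
--         while j > 0 and row[j - 1] != 1:
--             j -= 1
--         out.append(row if j == 0 else row[:j])
--     return out
-- ===== Notes on version B (the rewrite author's own statement) =====
-- stated objective: simpler
-- what changed: The in-place trim (for every cell equal to 1, scan forward for a later 1 and, failing that, pop all following cells one by one from the mutated row) is replaced by a single backwards scan per row that finds the last cell equal to 1 and takes one slice; the rotation loop is kept but written as a countdown while-loop.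
import Mathlib
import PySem

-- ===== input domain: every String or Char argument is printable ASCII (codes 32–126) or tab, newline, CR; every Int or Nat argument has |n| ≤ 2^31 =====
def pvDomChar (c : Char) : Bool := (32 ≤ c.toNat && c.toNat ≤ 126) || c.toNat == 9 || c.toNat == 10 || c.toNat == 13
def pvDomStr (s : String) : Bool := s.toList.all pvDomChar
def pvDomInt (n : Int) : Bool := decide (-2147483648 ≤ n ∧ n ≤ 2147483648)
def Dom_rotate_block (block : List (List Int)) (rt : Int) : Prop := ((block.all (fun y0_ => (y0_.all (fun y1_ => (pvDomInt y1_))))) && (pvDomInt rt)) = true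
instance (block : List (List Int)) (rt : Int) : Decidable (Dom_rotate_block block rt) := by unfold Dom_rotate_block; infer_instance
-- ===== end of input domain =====

-- B replaces A's in-place scan-and-pop trimming by a single backwards scan for the last
-- cell equal to 1 followed by one slice per row (objective: simpler). Return values only;
-- neither program mutates its input.

-- ===== PORT A =====
-- shared helper: `list(zip(*m))[::-1]` (identical expression in both Pythons).
-- zip(*m) truncates every row to the shortest row's length; modeled by columns 0..min-1.
def rot1 (m : List (List Int)) : List (List Int) :=
  let n := ((m.map List.length).min?).getD 0
  ((List.range n).map (fun j => m.map (fun r => r.getD j 0))).reverse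

-- `for i in range(x, len-1): if rotated[y][i+1] == 1: break` — true iff the loop broke
def laterOne (row : List Int) (i : Nat) : Bool :=
  if _h : i + 1 < row.length then
    if row.getD (i + 1) 0 = 1 then true else laterOne row (i + 1)
  else false
termination_by row.length - i

-- `for i in range(x, len-1): rotated[y].pop(x+1)` — pop at index x+1, n times
def popMany (r : List Int) (x : Nat) : Nat → List Int
  | 0 => r
  | n + 1 => popMany (r.take (x + 1) ++ r.drop (x + 2)) x n

-- A's inner `for x, b in enumerate(yb)` over the row being mutated: the iterator stops as
-- soon as x reaches the CURRENT length; fuel = initial length bounds the iteration count.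
def trimLoopA (row : List Int) (x : Nat) : Nat → List Int
  | 0 => row
  | fuel + 1 =>
    if x < row.length then
      if row.getD x 0 = 1 ∧ x + 1 < row.length then
        if laterOne row x then trimLoopA row (x + 1) fuel
        else trimLoopA (popMany row x (row.length - 1 - x)) (x + 1) fuel
      else trimLoopA row (x + 1) fuel
    else row

def rotate_block (block : List (List Int)) (rt : Int) : List (List Int) :=
  let rotated := (PySem.List.pyRange 0 (rt + 1) 1).foldl (fun r _ => rot1 r) block
  -- `[list(i) for i in rotated]` copies each row; a copy is the identity here
  let rotated := rotated.map (fun r => r)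
  rotated.map (fun row => trimLoopA row 0 row.length)

-- ===== PORT B =====
-- `while n > 0: rotated = list(zip(*rotated))[::-1]; n -= 1`
def rotN (m : List (List Int)) : Nat → List (List Int)
  | 0 => m
  | n + 1 => rotN (rot1 m) n

-- `j = len(row); while j > 0 and row[j-1] != 1: j -= 1`
def scanBack (row : List Int) : Nat → Nat
  | 0 => 0
  | j + 1 => if row.getD j 0 ≠ 1 then scanBack row j else j + 1

def trimB (row : List Int) : List Int :=
  let j := scanBack row row.length
  if j = 0 then row else row.take j

def rotate_block_alt (block : List (List Int)) (rt : Int) : List (List Int) :=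
  let rotated := rotN block (rt + 1).toNat
  rotated.foldl (fun out row => out ++ [trimB row]) []

-- ===== PRECONDITION & SPEC =====
def Spec_rotate_block (block : List (List Int)) (rt : Int) (out : List (List Int)) : Prop := out = rotate_block_alt block rt
instance (block : List (List Int)) (rt : Int) (out : List (List Int)) : Decidable (Spec_rotate_block block rt out) := by unfold Spec_rotate_block; infer_instance

-- ===== CLAIM (what is proved, stated in full; the proofs are below) =====
def Claim_equal_rotate_block : Prop := ∀ (block : List (List Int)) (rt : Int), Dom_rotate_block block rt → Spec_rotate_block block rt (rotate_block block rt)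

-- ===== LEMMAS AND PROOFS =====

theorem foldl_rot1_eq_rotN (l : List Int) (m : List (List Int)) :
    l.foldl (fun r _ => rot1 r) m = rotN m l.length := by
  induction l generalizing m with
  | nil => rfl
  | cons a t ih => simp [List.foldl, rotN, ih]

theorem scanBack_le (row : List Int) (j : Nat) : scanBack row j ≤ j := by
  induction j with
  | zero => exact Nat.le.refl
  | succ j ih => unfold scanBack; split <;> omega

-- combined characterization: no 1 at or after the result, and (if positive) a 1 just before it
theorem scanBack_char (row : List Int) (j : Nat) :
    (∀ k, scanBack row j ≤ k → k < j → row.getD k 0 ≠ 1) ∧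
    (0 < scanBack row j → row.getD (scanBack row j - 1) 0 = 1) := by
  induction j with
  | zero => exact ⟨fun k h1 h2 => absurd h2 (by omega), fun h => absurd h (Nat.lt_irrefl 0)⟩
  | succ j ih =>
    unfold scanBack
    split
    · rename_i hne
      refine ⟨fun k h1 h2 => ?_, ih.2⟩
      rcases Nat.lt_or_ge k j with h | h
      · exact ih.1 k h1 h
      · have : k = j := by omega
        simpa [this] using hne
    · rename_i he
      exact ⟨fun k h1 h2 => by omega, fun _ => by simpa using not_not.mp he⟩

theorem scanBack_eq_of (row : List Int) (j x : Nat) (hx : x < j)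
    (h1 : row.getD x 0 = 1) (h2 : ∀ k, x < k → k < j → row.getD k 0 ≠ 1) :
    scanBack row j = x + 1 := by
  obtain ⟨hno, hone⟩ := scanBack_char row j
  set n := scanBack row j with hn
  have hle : n ≤ j := scanBack_le row j
  rcases Nat.lt_or_ge x n with h | h
  · rcases Nat.lt_or_ge x (n - 1) with h' | h'
    · have hpos : 0 < n := by omega
      exact absurd (hone hpos) (h2 (n - 1) h' (by omega))
    · omega
  · exact absurd h1 (hno x h hx)

theorem laterOne_false_aux (row : List Int) (m : Nat) : ∀ x, row.length - x ≤ m →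
    (laterOne row x = false ↔ ∀ k, x + 1 ≤ k → k < row.length → row.getD k 0 ≠ 1) := by
  induction m with
  | zero =>
    intro x hx
    rw [laterOne, dif_neg (by omega)]
    exact ⟨fun _ k h1 h2 => absurd h2 (by omega), fun _ => rfl⟩
  | succ m ihm =>
    intro x hx
    rw [laterOne]
    by_cases h : x + 1 < row.length
    · rw [dif_pos h]
      by_cases he : row.getD (x + 1) 0 = 1
      · rw [if_pos he]
        constructor
        · intro hc; exact absurd hc (by simp)
        · intro hall; exact absurd he (hall (x + 1) le_rfl h)
      · rw [if_neg he, ihm (x + 1) (by omega)]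
        constructor
        · intro hall k hk1 hk2
          rcases Nat.lt_or_ge (x + 1) k with h' | h'
          · exact hall k (by omega) hk2
          · have hk : k = x + 1 := by omega
            rw [hk]; exact he
        · intro hall k hk1 hk2; exact hall k (by omega) hk2
    · rw [dif_neg h]
      exact ⟨fun _ k h1 h2 => absurd h2 (by omega), fun _ => rfl⟩

theorem laterOne_false_iff (row : List Int) (x : Nat) :
    laterOne row x = false ↔ ∀ k, x + 1 ≤ k → k < row.length → row.getD k 0 ≠ 1 :=
  laterOne_false_aux row row.length x (by omega)

theorem popMany_eq (r : List Int) (x : Nat) (n : Nat) :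
    popMany r x n = r.take (x + 1) ++ r.drop (x + 1 + n) := by
  induction n generalizing r with
  | zero => simp [popMany]
  | succ n ih =>
    unfold popMany
    rw [ih]
    rcases Nat.lt_or_ge r.length (x + 1) with h | h
    · have ht : r.take (x + 1) = r := List.take_of_length_le (by omega)
      have hd : r.drop (x + 2) = [] := List.drop_eq_nil_of_le (by omega)
      have hd' : r.drop (x + 1 + (n + 1)) = [] := List.drop_eq_nil_of_le (by omega)
      have hd'' : r.drop (x + 1 + n) = [] := List.drop_eq_nil_of_le (by omega)
      simp [ht, hd, hd', hd'']
    · have hlen : (r.take (x + 1)).length = x + 1 := by simp [h]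
      have e1 : (r.take (x + 1) ++ r.drop (x + 2)).take (x + 1) = r.take (x + 1) := by
        rw [List.take_append_of_le_length (by omega), List.take_take]
        simp
      have e2 : (r.take (x + 1) ++ r.drop (x + 2)).drop (x + 1 + n) = r.drop (x + 1 + (n + 1)) := by
        rw [List.drop_append, List.drop_eq_nil_of_le (by omega : (r.take (x+1)).length ≤ x + 1 + n),
            List.nil_append, List.drop_drop, hlen]
        congr 1
        omega
      rw [e1, e2]

theorem trimLoopA_eq (fuel : Nat) : ∀ (row : List Int) (x : Nat), row.length ≤ x + fuel →
    trimLoopA row x fuel =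
      (if scanBack row row.length ≤ x then row else row.take (scanBack row row.length)) := by
  induction fuel with
  | zero =>
    intro row x hle
    have := scanBack_le row row.length
    simp [trimLoopA, if_pos (by omega : scanBack row row.length ≤ x)]
  | succ fuel ih =>
    intro row x hle
    have hsb := scanBack_le row row.length
    obtain ⟨hno, hone⟩ := scanBack_char row row.length
    set n := scanBack row row.length with hn
    unfold trimLoopA
    rcases Nat.lt_or_ge x row.length with hx | hx
    · rw [if_pos hx]
      by_cases hcond : row.getD x 0 = 1 ∧ x + 1 < row.length
      · rw [if_pos hcond]
        rcases Bool.eq_false_or_eq_true (laterOne row x) with hl | hl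
        · -- a later 1 exists: skip
          rw [if_pos hl, ih row (x + 1) (by omega), ← hn]
          have : ∃ k, x + 1 ≤ k ∧ k < row.length ∧ row.getD k 0 = 1 := by
            by_contra hcon
            push Not at hcon
            have hf : laterOne row x = false := by
              rw [laterOne_false_iff]; intro k h1 h2; exact hcon k h1 h2
            rw [hl] at hf; exact absurd hf (by simp)
          obtain ⟨k, hk1, hk2, hk3⟩ := this
          have hkn : k < n := by
            by_contra hcon
            exact absurd hk3 (hno k (by omega) hk2)
          rw [if_neg (by omega), if_neg (by omega)]
        · -- no later 1: truncate to x+1 and stop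
          simp only [hl, Bool.false_eq_true, if_false]
          have hnone := (laterOne_false_iff row x).mp hl
          have hnx : n = x + 1 := scanBack_eq_of row row.length x hx hcond.1 hnone
          have hpm : popMany row x (row.length - 1 - x) = row.take (x + 1) := by
            rw [popMany_eq]
            have : x + 1 + (row.length - 1 - x) = row.length := by omega
            simp [this]
          rw [hpm]
          have hlen : (row.take (x + 1)).length = x + 1 := by simp; omega
          rw [ih (row.take (x + 1)) (x + 1) (by omega)]
          have : scanBack (row.take (x + 1)) (row.take (x + 1)).length ≤ x + 1 := by
            rw [hlen]; exact scanBack_le _ _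
          rw [if_pos this, if_neg (by omega), hnx]
      · rw [if_neg hcond, ih row (x + 1) (by omega), ← hn]
        rcases Nat.lt_or_ge x n with h | h
        · rcases Nat.lt_or_ge (x + 1) n with h' | h'
          · rw [if_neg (by omega), if_neg (by omega)]
          · -- n = x + 1: row[x] = 1, so the branch condition failed only because x+1 = len
            have hnx : n = x + 1 := by omega
            have h1 : row.getD x 0 = 1 := by
              have := hone (by omega)
              simpa [hnx] using this
            have hlenx : row.length = x + 1 := by
              rcases not_and_or.mp hcond with hc | hc
              · exact absurd h1 hc
              · omega
            rw [if_pos (by omega), if_neg (by omega), hnx, ← hlenx, List.take_length]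
        · rw [if_pos h, if_pos (by omega)]
    · rw [if_neg (by omega), if_pos (by omega)]

theorem trimLoopA_eq_trimB (row : List Int) : trimLoopA row 0 row.length = trimB row := by
  rw [trimLoopA_eq row.length row 0 (by omega), trimB]
  rcases Nat.eq_zero_or_pos (scanBack row row.length) with h | h
  · simp [h]
  · rw [if_neg (by omega), if_neg (by omega)]

-- ===== VERDICT (by name: the statement is the Claim_ definition above) =====
theorem rotate_block_spec : Claim_equal_rotate_block := by
  intro block rt _
  show _ = _
  unfold rotate_block rotate_block_alt
  rw [PySem.List.foldl_append_singleton_eq_map]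
  simp only [List.map_id_fun', id, List.nil_append]
  rw [foldl_rot1_eq_rotN, PySem.List.length_pyRange_one, Int.sub_zero]
  exact List.map_congr_left (fun row _ => trimLoopA_eq_trimB row)
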